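-- pv_equiv track=rewrite | github.com/ryebread321/advent-of-code-2025 | lib/day3.py | max_bank_joltage
-- ===== SOURCE A (Python) =====
-- def max_bank_joltage(bank: list[int]) -> int:
--     if (n := len(bank)) < 2:
--         return max(bank, default=0)
--     ten_idx = 0
--     one_idx = 1
--     for i in range(1, n - 1):
--         if bank[i] > bank[ten_idx]:
--             ten_idx = i
--             one_idx = i + 1
--         elif bank[i + 1] > bank[one_idx]:
--             one_idx = i + 1
--     return bank[ten_idx] * 10 + bank[one_idx]
-- ===== SOURCE B (Python) =====
-- def max_bank_joltage(bank: list[int]) -> int: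
--     if len(bank) < 2:
--         return max(bank, default=0)
--     prefix = bank[:-1]
--     t = prefix.index(max(prefix))
--     return bank[t] * 10 + max(bank[t + 1:])
-- ===== Notes on version B (the rewrite author's own statement) =====
-- stated objective: simpler
-- what changed: A's single interleaved greedy loop maintaining coupled (ten_idx, one_idx) state is replaced by two independent passes: the first argmax of bank[:-1] via max+index builtins, then a builtin max over the suffix slice bank[t+1:].
import Mathlib
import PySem

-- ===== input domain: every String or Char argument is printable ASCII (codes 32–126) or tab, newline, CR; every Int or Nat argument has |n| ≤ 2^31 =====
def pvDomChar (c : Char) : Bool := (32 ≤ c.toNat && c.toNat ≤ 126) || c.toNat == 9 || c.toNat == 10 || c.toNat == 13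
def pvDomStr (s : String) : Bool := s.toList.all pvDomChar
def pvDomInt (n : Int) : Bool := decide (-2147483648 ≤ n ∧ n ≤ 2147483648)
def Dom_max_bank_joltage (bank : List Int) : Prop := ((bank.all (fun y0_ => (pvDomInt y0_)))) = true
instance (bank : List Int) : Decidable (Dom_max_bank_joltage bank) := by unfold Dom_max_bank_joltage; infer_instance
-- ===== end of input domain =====

-- B replaces A's single interleaved greedy loop by two independent passes (first argmax of the
-- prefix via max+index, then a builtin max over the suffix slice); objective: simpler, same O(n) cost.

-- ===== PORT A =====
-- loop body of A's for-loop (state = (ten_idx, one_idx), i the loop variable)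
def pvStepA (bank : List Int) (s : Int × Int) (i : Int) : Int × Int :=
  if PySem.List.pyGetD bank i 0 > PySem.List.pyGetD bank s.1 0 then (i, i + 1)
  else if PySem.List.pyGetD bank (i + 1) 0 > PySem.List.pyGetD bank s.2 0 then (s.1, i + 1)
  else s

def max_bank_joltage (bank : List Int) : Int :=
  if PySem.List.len bank < 2 then PySem.List.maxD bank (fun x => x) 0
  else
    let st := (PySem.List.pyRange 1 (PySem.List.len bank - 1) 1).foldl (pvStepA bank) (0, 1)
    PySem.List.pyGetD bank st.1 0 * 10 + PySem.List.pyGetD bank st.2 0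

-- ===== PORT B =====
def max_bank_joltage_alt (bank : List Int) : Int :=
  if PySem.List.len bank < 2 then PySem.List.maxD bank (fun x => x) 0
  else
    let pre := PySem.List.slice bank none (some (-1))      -- bank[:-1]
    match PySem.List.max? pre (fun x => x) with
    | none => 0          -- unreachable: pre is nonempty when len bank ≥ 2
    | some m =>
      match PySem.List.index? pre m with
      | none => 0        -- unreachable: m ∈ pre
      | some t =>
        PySem.List.pyGetD bank (t : Int) 0 * 10 +
          (match PySem.List.max? (PySem.List.slice bank (some ((t : Int) + 1)) none) (fun x => x) with
           | none => 0   -- unreachable: suffix is nonempty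
           | some mm => mm)

-- ===== PRECONDITION & SPEC =====
def Spec_max_bank_joltage (bank : List Int) (out : Int) : Prop := out = max_bank_joltage_alt bank
instance (bank : List Int) (out : Int) : Decidable (Spec_max_bank_joltage bank out) := by unfold Spec_max_bank_joltage; infer_instance

-- ===== CLAIM (what is proved, stated in full; the proofs are below) =====
def Claim_equal_max_bank_joltage : Prop := ∀ (bank : List Int), Dom_max_bank_joltage bank → Spec_max_bank_joltage bank (max_bank_joltage bank)

-- ===== LEMMAS AND PROOFS =====

-- shorthand for bank[i] (default 0) in the invariant statements
def pvG (bank : List Int) (i : Int) : Int := PySem.List.pyGetD bank i 0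

-- invariant of A's loop after the indices 1..k have been processed
def pvInv (bank : List Int) (k : Int) (s : Int × Int) : Prop :=
  0 ≤ s.1 ∧ s.1 ≤ k ∧ s.1 < s.2 ∧ s.2 ≤ k + 1 ∧
  (∀ j : Int, 0 ≤ j → j < s.1 → pvG bank j < pvG bank s.1) ∧
  (∀ j : Int, 0 ≤ j → j ≤ k → pvG bank j ≤ pvG bank s.1) ∧
  (∀ j : Int, s.1 < j → j ≤ k + 1 → pvG bank j ≤ pvG bank s.2)

lemma pvInv_step (bank : List Int) (k : Int) (hk : 0 ≤ k) (s : Int × Int)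
    (h : pvInv bank k s) : pvInv bank (k + 1) (pvStepA bank s (k + 1)) := by
  obtain ⟨h0, h1, h2, h3, hstrict, hbound, hsuf⟩ := h
  unfold pvStepA pvInv
  split_ifs with c1 c2
  · refine ⟨by omega, by omega, by omega, by omega, ?_, ?_, ?_⟩
    · intro j hj0 hjk
      exact lt_of_le_of_lt (hbound j hj0 (by omega)) c1
    · intro j hj0 hjk
      rcases lt_or_eq_of_le hjk with hlt | heq
      · exact le_of_lt (lt_of_le_of_lt (hbound j hj0 (by omega)) c1)
      · simp [heq]
    · intro j hj1 hj2
      have : j = k + 1 + 1 := by omega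
      simp [this]
  · refine ⟨h0, by omega, by omega, by omega, hstrict, ?_, ?_⟩
    · intro j hj0 hjk
      rcases lt_or_eq_of_le hjk with hlt | heq
      · exact hbound j hj0 (by omega)
      · subst heq; exact le_of_not_gt c1
    · intro j hj1 hj2
      rcases lt_or_eq_of_le hj2 with hlt | heq
      · exact le_of_lt (lt_of_le_of_lt (hsuf j hj1 (by omega)) c2)
      · simp [heq]
  · refine ⟨h0, by omega, h2, by omega, hstrict, ?_, ?_⟩
    · intro j hj0 hjk
      rcases lt_or_eq_of_le hjk with hlt | heq
      · exact hbound j hj0 (by omega)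
      · subst heq; exact le_of_not_gt c1
    · intro j hj1 hj2
      rcases lt_or_eq_of_le hj2 with hlt | heq
      · exact hsuf j hj1 (by omega)
      · subst heq; exact le_of_not_gt c2

lemma pvLoop_inv (bank : List Int) (k : Nat) :
    pvInv bank (k : Int) ((PySem.List.pyRange 1 ((k : Int) + 1) 1).foldl (pvStepA bank) (0, 1)) := by
  induction k with
  | zero =>
    have h0 : PySem.List.pyRange 1 ((0 : Nat) + 1 : Int) 1 = [] := by
      push_cast
      exact PySem.List.pyRange_one_eq_nil (by omega)
    rw [h0]
    simp only [List.foldl_nil]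
    refine ⟨by norm_num, by norm_num, by norm_num, by norm_num, ?_, ?_, ?_⟩
    · intro j hj0 hj1; omega
    · intro j hj0 hj1
      have hj : j = 0 := by omega
      simp [hj]
    · intro j hj0 hj1
      have hj : j = 1 := by omega
      simp [hj]
  | succ n ih =>
    have hr : PySem.List.pyRange 1 (((n : Nat) + 1 : Int) + 1) 1
        = PySem.List.pyRange 1 ((n : Int) + 1) 1 ++ [(n : Int) + 1] := by
      exact PySem.List.pyRange_one_succ_right (by omega)
    push_cast at hr ⊢
    rw [hr, List.foldl_append]
    simp only [List.foldl]
    have hstep := pvInv_step bank (n : Int) (Int.natCast_nonneg n) _ ih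
    exact hstep

theorem max_bank_joltage_spec : Claim_equal_max_bank_joltage := by
  intro bank _
  unfold Spec_max_bank_joltage
  by_cases hsmall : PySem.List.len bank < 2
  · simp only [max_bank_joltage, max_bank_joltage_alt, if_pos hsmall]
  · have hN : 2 ≤ bank.length := by
      simp only [PySem.List.len_eq] at hsmall; omega
    simp only [max_bank_joltage, max_bank_joltage_alt, if_neg hsmall]
    set N := bank.length with hNdef
    have hcast : PySem.List.len bank - 1 = ((N - 2 : Nat) : Int) + 1 := by
      simp only [PySem.List.len_eq, ← hNdef]; omega
    rw [hcast]
    set st := (PySem.List.pyRange 1 (((N - 2 : Nat) : Int) + 1) 1).foldl (pvStepA bank) (0, 1) with hst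
    have hinv := pvLoop_inv bank (N - 2)
    rw [← hst] at hinv
    obtain ⟨hti0, htik, htioi, hoik, hstrict, hbound, hsuf⟩ := hinv
    have hk2 : ((N - 2 : Nat) : Int) = (N : Int) - 2 := by omega
    rw [hk2] at htik hoik hbound hsuf
    set ti := st.1
    set oi := st.2
    -- B's prefix
    have hpre : PySem.List.slice bank none (some (-1)) = bank.dropLast :=
      PySem.List.slice_to_neg_one bank
    have hprelen : bank.dropLast.length = N - 1 := by
      simp [← hNdef]
    have hprene : bank.dropLast ≠ [] := by
      intro hc; rw [hc] at hprelen; simp at hprelen; omega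
    -- bank[j] for j < N - 1 is dropLast[j]
    have hpv_get : ∀ (j : Nat), (hj : j < N - 1) → pvG bank (j : Int) = bank.dropLast[j]'(by omega) := by
      intro j hj
      have h1 : pvG bank (j : Int) = bank.getD j 0 := by
        simp only [pvG, PySem.List.pyGetD_natCast]
      rw [h1, List.getD_eq_getElem bank 0 (by omega), List.getElem_dropLast]
    -- max? of prefix
    obtain ⟨m, hm⟩ : ∃ m, PySem.List.max? bank.dropLast (fun x => x) = some m := by
      cases hmx : PySem.List.max? bank.dropLast (fun x => x) with
      | none => exact absurd ((PySem.List.max?_eq_none_iff _ _).mp hmx) hprene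
      | some m => exact ⟨m, rfl⟩
    have hmmem := PySem.List.max?_mem hm
    have hmmax := PySem.List.max?_isMax hm
    have htiN : ti.toNat < N - 1 := by omega
    have hticast : ((ti.toNat : Nat) : Int) = ti := by omega
    -- m = pvG bank ti
    have hm_eq : m = pvG bank ti := by
      apply le_antisymm
      · obtain ⟨j, hj, hjm⟩ := List.mem_iff_getElem.mp hmmem
        have hjN : j < N - 1 := by omega
        have hj2 : pvG bank (j : Int) = m := by rw [hpv_get j hjN]; exact hjm
        calc m = pvG bank (j : Int) := hj2.symm
          _ ≤ pvG bank ti := hbound (j : Int) (by omega) (by omega)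
      · have hmem2 : pvG bank ti ∈ bank.dropLast := by
          rw [← hticast, hpv_get ti.toNat htiN]
          exact List.getElem_mem _
        exact hmmax _ hmem2
    -- index? of m in prefix
    obtain ⟨t, ht⟩ : ∃ t, PySem.List.index? bank.dropLast m = some t := by
      cases hix : PySem.List.index? bank.dropLast m with
      | none => exact absurd ((PySem.List.index?_eq_none_iff _ _).mp hix) (by simp [hmmem])
      | some t => exact ⟨t, rfl⟩
    obtain ⟨htlen, htval, htfirst⟩ := PySem.List.getElem_of_index?_eq_some ht
    -- t = ti.toNat (first argmax)
    have ht_eq : t = ti.toNat := by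
      by_contra hne
      rcases Nat.lt_or_ge t ti.toNat with hlt | hge
      · have htN : t < N - 1 := by omega
        have hv : pvG bank (t : Int) = m := by rw [hpv_get t htN]; exact htval
        have hlt2 : pvG bank (t : Int) < pvG bank ti := hstrict (t : Int) (by omega) (by omega)
        rw [hv, hm_eq] at hlt2; exact lt_irrefl _ hlt2
      · have hlt : ti.toNat < t := by omega
        have hv : bank.dropLast[ti.toNat]'(by omega) = m := by
          rw [← hpv_get ti.toNat htiN, hticast, hm_eq]
        exact htfirst ti.toNat hlt hv
    subst ht_eq
    -- the suffix slice bank[t+1:]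
    have hsufslice : PySem.List.slice bank (some ((ti.toNat : Int) + 1)) none = bank.drop (ti.toNat + 1) := by
      rw [show ((ti.toNat : Int) + 1) = ((ti.toNat + 1 : Nat) : Int) by push_cast; ring]
      exact PySem.List.slice_from_natCast bank (ti.toNat + 1)
    have hsuflen : (bank.drop (ti.toNat + 1)).length = N - (ti.toNat + 1) := by
      simp [← hNdef]
    have hsufne : bank.drop (ti.toNat + 1) ≠ [] := by
      intro hc; rw [hc] at hsuflen; simp at hsuflen; omega
    obtain ⟨mm, hmm⟩ : ∃ mm, PySem.List.max? (bank.drop (ti.toNat + 1)) (fun x => x) = some mm := by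
      cases hmx : PySem.List.max? (bank.drop (ti.toNat + 1)) (fun x => x) with
      | none => exact absurd ((PySem.List.max?_eq_none_iff _ _).mp hmx) hsufne
      | some mm => exact ⟨mm, rfl⟩
    have hmmmem := PySem.List.max?_mem hmm
    have hmmmax := PySem.List.max?_isMax hmm
    have hdrop_get : ∀ (j : Nat), (hj : j < N - (ti.toNat + 1)) →
        (bank.drop (ti.toNat + 1))[j]'(by omega) = pvG bank ((ti.toNat + 1 + j : Nat) : Int) := by
      intro j hj
      rw [List.getElem_drop]
      have h1 : pvG bank ((ti.toNat + 1 + j : Nat) : Int) = bank.getD (ti.toNat + 1 + j) 0 := by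
        simp only [pvG, PySem.List.pyGetD_natCast]
      rw [h1, List.getD_eq_getElem bank 0 (by omega)]
    have hoicast : ((oi.toNat : Nat) : Int) = oi := by omega
    -- mm = pvG bank oi
    have hmm_eq : mm = pvG bank oi := by
      apply le_antisymm
      · obtain ⟨j, hj, hjm⟩ := List.mem_iff_getElem.mp hmmmem
        have hjN : j < N - (ti.toNat + 1) := by omega
        have hv : mm = pvG bank ((ti.toNat + 1 + j : Nat) : Int) := by
          rw [← hdrop_get j hjN]; exact hjm.symm
        rw [hv]
        exact hsuf _ (by omega) (by omega)
      · have hidx : oi.toNat - (ti.toNat + 1) < N - (ti.toNat + 1) := by omega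
        have hmem2 : pvG bank oi ∈ bank.drop (ti.toNat + 1) := by
          rw [← hoicast,
            show (oi.toNat : Int) = ((ti.toNat + 1 + (oi.toNat - (ti.toNat + 1)) : Nat) : Int) by omega,
            ← hdrop_get _ hidx]
          exact List.getElem_mem _
        exact hmmmax _ hmem2
    -- assemble
    simp only [hpre, hm, ht, hsufslice, hmm]
    rw [hticast, hmm_eq]
    simp [pvG]
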